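-- pv_equiv track=rewrite | github.com/sh4lk/OMNISCIENCE | omniscience/solvers/dlog.py | _try_factor_over_base
-- ===== SOURCE A (Python) =====
-- def _try_factor_over_base(val: int, primes: list[int]) -> list[int] | None:
--     """Try to factor val over the given prime base. Return exponent vector or None."""
--     exponents = [0] * len(primes)
--     remaining = val
--     for i, p in enumerate(primes):
--         while remaining % p == 0:
--             exponents[i] += 1
--             remaining //= p
--     if remaining == 1:
--         return exponents
--     return None
-- ===== SOURCE B (Python) =====
-- def _try_factor_over_base(val: int, primes: list[int]) -> list[int] | None:
--     """Try to factor val over the given prime base. Return exponent vector or None."""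
--     remaining = val
--     exponents = []
--     for p in primes:
--         # ascend: stack of (p**(2**j), 2**j) while that power divides remaining
--         powers = []
--         q, k = p, 1
--         while remaining % q == 0:
--             powers.append((q, k))
--             q, k = q * q, 2 * k
--         # descend: greedily divide out the largest powers (binary decomposition)
--         e = 0
--         while powers:
--             q, k = powers.pop()
--             if remaining % q == 0:
--                 remaining //= q
--                 e += k
--         exponents.append(e)
--     if remaining == 1:
--         return exponents
--     return None
-- ===== Notes on version B (the rewrite author's own statement) =====
-- stated objective: alternative
-- what changed: Per prime, the exponent is extracted by repeated squaring (push p, p^2, p^4, ... while they divide, then greedily divide back down, binary-decomposing the exponent) instead of A's one-division-at-a-time loop; the exponent list is built by appending rather than mutating a preallocated zero vector.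
import Mathlib
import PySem

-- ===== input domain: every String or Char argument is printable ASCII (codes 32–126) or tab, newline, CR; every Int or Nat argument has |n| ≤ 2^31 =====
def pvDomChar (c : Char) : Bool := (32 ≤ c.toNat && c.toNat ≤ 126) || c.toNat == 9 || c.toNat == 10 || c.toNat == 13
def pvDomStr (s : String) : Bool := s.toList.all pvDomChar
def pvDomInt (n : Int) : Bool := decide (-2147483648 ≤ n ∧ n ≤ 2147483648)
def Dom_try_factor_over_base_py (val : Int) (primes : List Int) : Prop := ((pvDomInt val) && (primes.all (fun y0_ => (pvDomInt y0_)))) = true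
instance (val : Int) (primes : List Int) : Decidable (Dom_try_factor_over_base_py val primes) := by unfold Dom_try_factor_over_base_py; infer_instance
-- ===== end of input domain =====

-- B replaces A's one-division-at-a-time exponent loop by a repeated-squaring (binary) valuation per prime
-- and builds the exponent list by appending instead of mutating a preallocated zero vector; alternative, not claimed faster.


-- ===== PORT A =====
-- the inner 'while remaining % p == 0' loop; fuel only makes it total (Python has none)
def aLoop : Nat → Int → Int → List Int → Int → List Int × Int
  | 0, _, _, exps, r => (exps, r)
  | f+1, i, p, exps, r =>
    if PySem.Int.mod r p = 0 then
      aLoop f i p (PySem.List.pySetD exps i (PySem.List.pyGetD exps i 0 + 1)) (PySem.Int.floordiv r p)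
    else (exps, r)

def try_factor_over_base_py (val : Int) (primes : List Int) : Option (List Int) :=
  let st := (PySem.List.enumerate primes 0).foldl
    (fun (st : List Int × Int) ip => aLoop (st.2.natAbs + 1) ip.1 ip.2 st.1 st.2)
    (List.replicate primes.length 0, val)
  if st.2 = 1 then some st.1 else none

-- ===== PORT B =====
-- ascend: push (q, k) = (p^(2^j), 2^j) while q divides r; fuel only makes it total
def bAsc : Nat → Int → Int → List (Int × Int) → Int → List (Int × Int)
  | 0, _, _, stack, _ => stack
  | f+1, q, k, stack, r =>
    if PySem.Int.mod r q = 0 then bAsc f (q*q) (2*k) ((q, k) :: stack) r else stack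

-- descend: pop the stack, greedily dividing out the stored powers
def bDesc : List (Int × Int) → Int → Int → Int × Int
  | [], e, r => (e, r)
  | (q, _k) :: t, e, r =>
    if PySem.Int.mod r q = 0 then bDesc t (e + _k) (PySem.Int.floordiv r q) else bDesc t e r

def try_factor_over_base_py_alt (val : Int) (primes : List Int) : Option (List Int) :=
  let st := primes.foldl
    (fun (st : List Int × Int) p =>
      let stack := bAsc (st.2.natAbs + 1) p 1 [] st.2
      let er := bDesc stack 0 st.2
      (st.1 ++ [er.1], er.2))
    ([], val)
  if st.2 = 1 then some st.1 else none

-- ===== PRECONDITION & SPEC =====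
-- Pre_ excludes exactly the inputs where Python A does not return: primes containing 0 (ZeroDivisionError
-- at 'remaining % 0') or 1/-1 (the while loop never terminates), and val = 0 with a nonempty base
-- (0 % p == 0 and 0 // p == 0 forever).
def Pre_try_factor_over_base_py (val : Int) (primes : List Int) : Prop :=
  (primes = [] ∨ val ≠ 0) ∧ ∀ p ∈ primes, p ≠ 0 ∧ p ≠ 1 ∧ p ≠ -1
instance (val : Int) (primes : List Int) : Decidable (Pre_try_factor_over_base_py val primes) := by
  unfold Pre_try_factor_over_base_py; infer_instance

def pvWitness_try_factor_over_base_py : Int × List Int := (12, [2, 3])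

def Spec_try_factor_over_base_py (val : Int) (primes : List Int) (out : Option (List Int)) : Prop := out = try_factor_over_base_py_alt val primes
instance (val : Int) (primes : List Int) (out : Option (List Int)) : Decidable (Spec_try_factor_over_base_py val primes out) := by unfold Spec_try_factor_over_base_py; infer_instance

-- ===== CLAIM (what is proved, stated in full; the proofs are below) =====
def Claim_equal_try_factor_over_base_py : Prop := ∀ (val : Int) (primes : List Int), Dom_try_factor_over_base_py val primes → Pre_try_factor_over_base_py val primes → Spec_try_factor_over_base_py val primes (try_factor_over_base_py val primes)

-- ===== LEMMAS AND PROOFS =====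

-- the stack bAsc builds: (p^(2^j), 2^j) for j = t-1 ... 0 (proof-only helper)
def stackOf (p : Int) : Nat → List (Int × Int)
  | 0 => []
  | j+1 => (p ^ (2 ^ j), (2:Int) ^ j) :: stackOf p j

lemma decomp_unique (p : Int) (hp : p ≠ 0) {a b : Nat} {s t : Int}
    (hs : ¬ p ∣ s) (ht : ¬ p ∣ t) (h : p ^ a * s = p ^ b * t) : a = b ∧ s = t := by
  rcases le_or_gt a b with hab | hab
  · have h' : s = p ^ (b - a) * t := by
      have hpa : (p : Int) ^ a ≠ 0 := pow_ne_zero _ hp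
      have : p ^ a * s = p ^ a * (p ^ (b - a) * t) := by
        rw [h, ← mul_assoc, ← pow_add]; congr 2; omega
      exact mul_left_cancel₀ hpa this
    rcases Nat.eq_or_lt_of_le hab with heq | hlt
    · subst heq; simp at h'; exact ⟨rfl, by simpa using h'⟩
    · exfalso; apply hs
      rw [h']
      exact Dvd.dvd.mul_right (dvd_pow_self p (by omega)) t
  · exfalso; apply ht
    have h' : t = p ^ (a - b) * s := by
      have hpb : (p : Int) ^ b ≠ 0 := pow_ne_zero _ hp
      have : p ^ b * t = p ^ b * (p ^ (a - b) * s) := by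
        rw [← h, ← mul_assoc, ← pow_add]; congr 2; omega
      exact mul_left_cancel₀ hpb this
    rw [h']
    exact Dvd.dvd.mul_right (dvd_pow_self p (by omega)) s

lemma floordiv_exact (r p : Int) (h : PySem.Int.mod r p = 0) :
    p * PySem.Int.floordiv r p = r := by
  have := PySem.Int.floordiv_mul_add_mod r p
  rw [h] at this; linarith [this]

lemma natAbs_floordiv_lt (r p : Int) (hr : r ≠ 0) (hp : 2 ≤ p.natAbs)
    (h : PySem.Int.mod r p = 0) : (PySem.Int.floordiv r p).natAbs < r.natAbs := by
  have hex := floordiv_exact r p h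
  have h1 : p.natAbs * (PySem.Int.floordiv r p).natAbs = r.natAbs := by
    rw [← Int.natAbs_mul, hex]
  have hq : (PySem.Int.floordiv r p).natAbs ≠ 0 := by
    intro h0
    apply hr
    rw [← hex, Int.natAbs_eq_zero.mp h0, mul_zero]
  have h2 : 2 * (PySem.Int.floordiv r p).natAbs ≤ p.natAbs * (PySem.Int.floordiv r p).natAbs :=
    Nat.mul_le_mul_right _ hp
  omega

lemma aLoop_spec (p : Int) (hp : 2 ≤ p.natAbs) :
    ∀ (fuel : Nat) (r : Int), r ≠ 0 → r.natAbs < fuel →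
    ∀ (exps : List Int) (n : Nat), n < exps.length →
    ∃ (m : Nat) (s : Int),
      aLoop fuel (n : Int) p exps r = (exps.set n (exps.getD n 0 + m), s) ∧
      r = p ^ m * s ∧ ¬ p ∣ s ∧ s ≠ 0 := by
  intro fuel
  induction fuel with
  | zero => intro r _ hf; omega
  | succ f ih =>
    intro r hr hf exps n hn
    by_cases hd : PySem.Int.mod r p = 0
    · have hex := floordiv_exact r p hd
      have hr' : PySem.Int.floordiv r p ≠ 0 := by
        intro h0; apply hr; rw [← hex, h0, mul_zero]
      have hdec := natAbs_floordiv_lt r p hr hp hd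
      obtain ⟨m, s, heq, hrs, hnds, hs⟩ :=
        ih (PySem.Int.floordiv r p) hr' (by omega)
          (exps.set n (exps.getD n 0 + 1)) n (by simpa using hn)
      refine ⟨m + 1, s, ?_, ?_, hnds, hs⟩
      · show aLoop (f+1) (n : Int) p exps r = _
        rw [aLoop, if_pos hd]
        simp only [PySem.List.pySetD_natCast, PySem.List.pyGetD_natCast] at heq ⊢
        rw [heq]
        rw [List.set_set]
        congr 1
        have : (exps.set n (exps.getD n 0 + 1)).getD n 0 = exps.getD n 0 + 1 := by
          rw [List.getD_eq_getElem?_getD, List.getElem?_set_self (by simpa using hn)]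
          rfl
        rw [this]
        push_cast
        congr 1
        ring
      · rw [← hex, hrs, pow_succ]; ring
    · refine ⟨0, r, ?_, by simp, ?_, hr⟩
      · show aLoop (f+1) (n : Int) p exps r = _
        rw [aLoop, if_neg hd]
        congr 1
        simp only [Nat.cast_zero, add_zero, List.getD_eq_getElem?_getD,
          List.getElem?_eq_getElem hn, Option.getD_some]
        exact (List.set_getElem_self hn).symm
      · intro hdvd
        exact hd ((PySem.Int.mod_eq_zero_iff_dvd r p).mpr hdvd)

lemma pow_sq (p : Int) (t : Nat) : p ^ (2 ^ t) * p ^ (2 ^ t) = p ^ (2 ^ (t+1)) := by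
  rw [← pow_add]; congr 1; omega

lemma bAsc_spec (p : Int) (hp : 2 ≤ p.natAbs) (r : Int) (hr : r ≠ 0) :
    ∀ (fuel t : Nat), t + fuel = r.natAbs + 1 →
    ∃ u, bAsc fuel (p ^ (2 ^ t)) ((2:Int) ^ t) (stackOf p t) r = stackOf p u ∧ ¬ p ^ (2 ^ u) ∣ r := by
  intro fuel
  induction fuel with
  | zero =>
    intro t ht
    refine ⟨t, rfl, ?_⟩
    intro hdvd
    have h1 : (p ^ (2 ^ t)).natAbs ≤ r.natAbs :=
      Nat.le_of_dvd (Int.natAbs_pos.mpr hr) (Int.natAbs_dvd_natAbs.mpr hdvd)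
    rw [Int.natAbs_pow] at h1
    have h2 : 2 ^ (2 ^ t) ≤ p.natAbs ^ (2 ^ t) := Nat.pow_le_pow_left hp _
    have h3 : t < 2 ^ t := Nat.lt_two_pow_self
    have h4 : 2 ^ t ≤ 2 ^ (2 ^ t) := Nat.pow_le_pow_right (by omega) (by omega)
    omega
  | succ f ih =>
    intro t ht
    rw [bAsc]
    by_cases hd : PySem.Int.mod r (p ^ (2 ^ t)) = 0
    · rw [if_pos hd]
      have hq : p ^ (2 ^ t) * p ^ (2 ^ t) = p ^ (2 ^ (t+1)) := pow_sq p t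
      have hk : 2 * (2:Int) ^ t = 2 ^ (t+1) := by ring
      rw [hq, hk]
      have : (p ^ (2 ^ t), (2:Int) ^ t) :: stackOf p t = stackOf p (t+1) := rfl
      rw [this]
      exact ih (t+1) (by omega)
    · rw [if_neg hd]
      refine ⟨t, rfl, fun hdvd => hd ((PySem.Int.mod_eq_zero_iff_dvd _ _).mpr hdvd)⟩

lemma bDesc_spec (p : Int) (_hp : 2 ≤ p.natAbs) :
    ∀ (j : Nat) (e r : Int), r ≠ 0 → ¬ p ^ (2 ^ j) ∣ r →
    ∃ (w : Nat) (s : Int), bDesc (stackOf p j) e r = (e + w, s) ∧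
      r = p ^ w * s ∧ ¬ p ∣ s ∧ s ≠ 0 := by
  intro j
  induction j with
  | zero =>
    intro e r hr hnd
    refine ⟨0, r, by simp [stackOf, bDesc], by simp, ?_, hr⟩
    intro hdvd
    exact hnd (by simpa using hdvd)
  | succ j ih =>
    intro e r hr hnd
    rw [show stackOf p (j+1) = (p ^ (2 ^ j), (2:Int) ^ j) :: stackOf p j from rfl, bDesc]
    by_cases hd : PySem.Int.mod r (p ^ (2 ^ j)) = 0
    · rw [if_pos hd]
      have hex := floordiv_exact r (p ^ (2 ^ j)) hd
      set r' := PySem.Int.floordiv r (p ^ (2 ^ j)) with hr'def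
      have hr' : r' ≠ 0 := by
        intro h0; apply hr; rw [← hex, h0, mul_zero]
      have hnd' : ¬ p ^ (2 ^ j) ∣ r' := by
        intro ⟨c, hc⟩
        apply hnd
        refine ⟨c, ?_⟩
        rw [← hex, hc, ← pow_sq]; ring
      obtain ⟨w, s, heq, hrs, hnds, hs⟩ := ih (e + (2:Int) ^ j) r' hr' hnd'
      refine ⟨2 ^ j + w, s, ?_, ?_, hnds, hs⟩
      · rw [heq]; congr 1; push_cast; ring
      · rw [← hex, hrs, pow_add]; ring
    · rw [if_neg hd]
      have : ¬ p ^ (2 ^ j) ∣ r := fun hdvd => hd ((PySem.Int.mod_eq_zero_iff_dvd _ _).mpr hdvd)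
      exact ih e r hr this

lemma bStep_spec (p r : Int) (hp : 2 ≤ p.natAbs) (hr : r ≠ 0) :
    ∃ (m : Nat) (s : Int), bDesc (bAsc (r.natAbs + 1) p 1 [] r) 0 r = ((m : Int), s) ∧
      r = p ^ m * s ∧ ¬ p ∣ s ∧ s ≠ 0 := by
  have h0 : bAsc (r.natAbs + 1) p 1 [] r
      = bAsc (r.natAbs + 1) (p ^ (2 ^ 0)) ((2:Int) ^ 0) (stackOf p 0) r := by
    norm_num [stackOf]
  obtain ⟨u, hasc, hnd⟩ := bAsc_spec p hp r hr (r.natAbs + 1) 0 (by omega)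
  obtain ⟨w, s, heq, hrs, hnds, hs⟩ := bDesc_spec p hp u 0 r hr hnd
  refine ⟨w, s, ?_, hrs, hnds, hs⟩
  rw [h0, hasc, heq]
  simp

lemma getD_append_len (acc l : List Int) (y d : Int) : (acc ++ y :: l).getD acc.length d = y := by
  rw [List.getD_eq_getElem?_getD, List.getElem?_append_right (le_refl _)]
  simp

lemma set_append_len (acc l : List Int) (y v : Int) : (acc ++ y :: l).set acc.length v = acc ++ v :: l := by
  rw [List.set_append_right _ _ (le_refl _)]
  simp

lemma outer (ps : List Int) :
    ∀ (acc : List Int) (r : Int), r ≠ 0 → (∀ p ∈ ps, 2 ≤ p.natAbs) →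
    ∃ (res : List Int) (r' : Int), r' ≠ 0 ∧
      (PySem.List.enumerate ps (acc.length : Int)).foldl
        (fun (st : List Int × Int) ip => aLoop (st.2.natAbs + 1) ip.1 ip.2 st.1 st.2)
        (acc ++ List.replicate ps.length 0, r) = (acc ++ res, r') ∧
      ps.foldl
        (fun (st : List Int × Int) p =>
          let stack := bAsc (st.2.natAbs + 1) p 1 [] st.2
          let er := bDesc stack 0 st.2
          (st.1 ++ [er.1], er.2))
        (acc, r) = (acc ++ res, r') := by
  induction ps with
  | nil =>
    intro acc r hr _
    exact ⟨[], r, hr, by simp [PySem.List.enumerate_nil], by simp⟩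
  | cons p t ih =>
    intro acc r hr hall
    have hp : 2 ≤ p.natAbs := hall p (by simp)
    have hexps : acc ++ List.replicate (p :: t).length (0:Int)
        = acc ++ (0:Int) :: List.replicate t.length 0 := by
      simp [List.replicate_succ]
    obtain ⟨m, s, haeq, hrs, hnds, hs⟩ :=
      aLoop_spec p hp (r.natAbs + 1) r hr (by omega)
        (acc ++ List.replicate (p :: t).length 0) acc.length (by simp)
    obtain ⟨m2, s2, hbeq, hrs2, hnds2, hs2⟩ := bStep_spec p r hp hr
    obtain ⟨hm, hsv⟩ :=
      decomp_unique p (by omega) hnds hnds2 (by rw [← hrs, ← hrs2])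
    subst hm; subst hsv
    have haeq' : aLoop (r.natAbs + 1) (acc.length : Int) p
        (acc ++ List.replicate (p :: t).length 0) r
        = (acc ++ (m : Int) :: List.replicate t.length 0, s) := by
      rw [haeq, hexps, getD_append_len, zero_add, set_append_len]
    obtain ⟨res, r', hr', hA, hB⟩ :=
      ih (acc ++ [(m : Int)]) s hs (fun q hq => hall q (by simp [hq]))
    refine ⟨(m : Int) :: res, r', hr', ?_, ?_⟩
    · rw [PySem.List.enumerate_cons]
      rw [List.foldl_cons]
      dsimp only
      rw [haeq']
      have hlen : (acc.length : Int) + 1 = ((acc ++ [(m : Int)]).length : Int) := by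
        simp
      have hacc : acc ++ (m : Int) :: List.replicate t.length 0
          = (acc ++ [(m : Int)]) ++ List.replicate t.length 0 := by
        simp
      rw [hlen, hacc, hA]
      simp
    · rw [List.foldl_cons]
      dsimp only
      rw [hbeq]
      rw [show acc ++ [((m : Nat) : Int)] = acc ++ [(m : Int)] from rfl, hB]
      simp

-- ===== VERDICT (by name: the statement is the Claim_ definition above) =====
theorem try_factor_over_base_py_spec : Claim_equal_try_factor_over_base_py := by
  intro val primes _hdom hpre
  unfold Spec_try_factor_over_base_py try_factor_over_base_py try_factor_over_base_py_alt
  obtain ⟨h0, hbad⟩ := hpre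
  rcases h0 with h0 | h0
  · subst h0; rfl
  · have hgood : ∀ p ∈ primes, 2 ≤ p.natAbs := by
      intro p hp
      obtain ⟨h1, h2, h3⟩ := hbad p hp
      rcases Int.natAbs_eq p with h | h <;> omega
    obtain ⟨res, r', _, hA, hB⟩ := outer primes [] val h0 hgood
    simp only [List.length_nil, Int.natCast_zero, List.nil_append] at hA hB
    rw [hA, hB]
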